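-- pv_equiv track=rewrite | github.com/ACHolmes/CS124-P2 | strassen.py | create_P
-- ===== SOURCE A (Python) =====
-- def create_P(size, n0):
--     size_copy = size
--     counter = 0
--     while size_copy > n0:
--         counter += 1
--         size_copy = int(size_copy / 2)
--     out = []
--     for i in range(counter):
--         createSize = int(size / (2 ** (i + 1)))
--         for j in range(8):
--             out.append([[0 for x in range(createSize)] for y in range(createSize)])
--     return out
-- ===== SOURCE B (Python) =====
-- def create_P(size, n0):
--     # Recursive decomposition: no counting pass and no power table -- each call
--     # emits one level's eight zero matrices of side size//2 and recurses on that half.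
--     if size <= n0:
--         return []
--     half = size // 2
--     block = [[[0] * half for _ in range(half)] for _ in range(8)]
--     return block + create_P(half, n0)
-- ===== Notes on version B (the rewrite author's own statement) =====
-- stated objective: alternative
-- what changed: Replaces A's two staged passes (a counting while-loop, then an indexed for-loop recomputing each level's size as int(size/2**(i+1))) with a single recursive function that emits one level's eight zero matrices of side size//2 and recurses on that half; no counter, no power table.
import Mathlib
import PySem

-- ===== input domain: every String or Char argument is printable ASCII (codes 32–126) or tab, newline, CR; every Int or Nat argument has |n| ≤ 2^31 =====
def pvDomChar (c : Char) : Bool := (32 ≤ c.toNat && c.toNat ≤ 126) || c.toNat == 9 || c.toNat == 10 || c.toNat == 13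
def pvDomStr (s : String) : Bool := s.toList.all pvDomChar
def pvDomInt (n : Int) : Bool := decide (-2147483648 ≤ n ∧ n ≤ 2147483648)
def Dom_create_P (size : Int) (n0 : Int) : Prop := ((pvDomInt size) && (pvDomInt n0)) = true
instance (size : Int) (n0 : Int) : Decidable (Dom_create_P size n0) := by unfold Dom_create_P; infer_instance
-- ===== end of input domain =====

-- B replaces A's two staged passes (counting while-loop, then an indexed for-loop with powers of 2)
-- by one recursive function emitting eight zero matrices of side size//2 per level (objective:
-- alternative; return value only).

-- ===== PORT A =====
-- A's counting while-loop; the '0 ≤ n0' conjunct is ONLY a termination guard (inside Pre_ the loop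
-- is entered only when 0 ≤ n0, so the guard coincides with Python's 'size_copy > n0').
-- int(size_copy / 2) is PySem.Int.truncdiv, exact on |size_copy| ≤ 2^31 < 2^53.
def countLoop (sc n0 : Int) : Int :=
  if h : n0 < sc ∧ 0 ≤ n0 then 1 + countLoop (PySem.Int.truncdiv sc 2) n0 else 0
termination_by sc.toNat
decreasing_by
  simp [PySem.Int.truncdiv, Int.tdiv_eq_ediv_of_nonneg (by omega : (0:Int) ≤ sc)]
  omega

def create_P (size : Int) (n0 : Int) : List (List (List Int)) :=
  let counter := countLoop size n0
  (PySem.List.pyRange 0 counter 1).foldl (fun out i =>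
    -- createSize = int(size / (2 ** (i + 1))): exact as truncdiv on the domain (|size| ≤ 2^31 < 2^53
    -- so the float division is exact); i ≥ 0 so the Nat exponent (i+1).toNat is faithful.
    let createSize := PySem.Int.truncdiv size ((2:Int) ^ (i + 1).toNat)
    (PySem.List.pyRange 0 8 1).foldl (fun out _j =>
      out ++ [(PySem.List.pyRange 0 createSize 1).map (fun _y =>
               (PySem.List.pyRange 0 createSize 1).map (fun _x => (0:Int)))]) out) []

-- ===== PORT B =====
-- Source B's recursion; the inner '0 ≤ n0' guard is ONLY for termination: inside Pre_, whenever the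
-- first branch is not taken we have n0 < size with 0 ≤ n0, so the guard is always true there.
-- [0] * half is List.replicate half.toNat.
def create_P_alt (size : Int) (n0 : Int) : List (List (List Int)) :=
  if size ≤ n0 then []
  else if _h : 0 ≤ n0 then
    ((PySem.List.pyRange 0 8 1).map (fun _ =>
       (PySem.List.pyRange 0 (PySem.Int.floordiv size 2) 1).map (fun _ =>
         List.replicate (PySem.Int.floordiv size 2).toNat (0:Int))))
      ++ create_P_alt (PySem.Int.floordiv size 2) n0
  else []
termination_by size.toNat
decreasing_by
  rw [PySem.Int.floordiv_eq_ediv_of_pos (by norm_num : (0:Int) < 2)]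
  omega

-- ===== PRECONDITION & SPEC =====
-- Pre_ excludes exactly the inputs (n0 < 0 ∧ n0 < size) on which A's while-loop never terminates
-- (size_copy is truncated towards 0, and 0 > n0 stays true forever); B also fails to return there
-- (unbounded recursion).
def Pre_create_P (size : Int) (n0 : Int) : Prop := 0 ≤ n0 ∨ size ≤ n0
instance (size : Int) (n0 : Int) : Decidable (Pre_create_P size n0) := by unfold Pre_create_P; infer_instance
def pvWitness_create_P : Int × Int := (8, 1)
def Spec_create_P (size : Int) (n0 : Int) (out : List (List (List Int))) : Prop := out = create_P_alt size n0
instance (size : Int) (n0 : Int) (out : List (List (List Int))) : Decidable (Spec_create_P size n0 out) := by unfold Spec_create_P; infer_instance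

-- ===== CLAIM (what is proved, stated in full; the proofs are below) =====
def Claim_equal_create_P : Prop := ∀ (size : Int) (n0 : Int), Dom_create_P size n0 → Pre_create_P size n0 → Spec_create_P size n0 (create_P size n0)

-- ===== LEMMAS AND PROOFS =====

-- the common normal form: the zero matrix of side c, and the list of levels
def matM (c : Int) : List (List Int) := List.replicate c.toNat (List.replicate c.toNat (0:Int))

def normP (size n0 : Int) : List (List (List Int)) :=
  (List.range (countLoop size n0).toNat).flatMap (fun k =>
    List.replicate 8 (matM (PySem.Int.floordiv size ((2:Int) ^ (k + 1)))))

theorem truncdiv_eq_floordiv_of_nonneg (a : Int) (h : 0 ≤ a) :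
    PySem.Int.truncdiv a 2 = PySem.Int.floordiv a 2 := by
  simp [PySem.Int.truncdiv, PySem.Int.floordiv,
        Int.tdiv_eq_ediv_of_nonneg h, Int.fdiv_eq_ediv_of_nonneg a (by norm_num : (0:Int) ≤ 2)]

theorem floordiv_floordiv (m a b : Int) (ha : 0 < a) (hb : 0 < b) :
    PySem.Int.floordiv (PySem.Int.floordiv m a) b = PySem.Int.floordiv m (a * b) := by
  rw [PySem.Int.floordiv_eq_ediv_of_pos ha, PySem.Int.floordiv_eq_ediv_of_pos hb,
      PySem.Int.floordiv_eq_ediv_of_pos (by positivity)]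
  exact Int.ediv_ediv_of_nonneg (le_of_lt ha)

theorem floordiv_nonneg_of_nonneg (m b : Int) (hm : 0 ≤ m) (hb : 0 < b) :
    0 ≤ PySem.Int.floordiv m b := by
  rw [PySem.Int.floordiv_eq_ediv_of_pos hb]; exact Int.ediv_nonneg hm (le_of_lt hb)

theorem countLoop_nonneg (sc n0 : Int) : 0 ≤ countLoop sc n0 := by
  rw [countLoop]
  by_cases h : n0 < sc ∧ 0 ≤ n0
  · rw [dif_pos h]
    have := countLoop_nonneg (PySem.Int.truncdiv sc 2) n0
    omega
  · rw [dif_neg h]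
termination_by sc.toNat
decreasing_by
  simp [PySem.Int.truncdiv, Int.tdiv_eq_ediv_of_nonneg (by omega : (0:Int) ≤ sc)]
  omega

theorem countLoop_of_le (sc n0 : Int) (h : sc ≤ n0) : countLoop sc n0 = 0 := by
  rw [countLoop, dif_neg (by omega)]

theorem countLoop_of_lt (sc n0 : Int) (h1 : n0 < sc) (h2 : 0 ≤ n0) :
    countLoop sc n0 = 1 + countLoop (PySem.Int.floordiv sc 2) n0 := by
  rw [countLoop, dif_pos ⟨h1, h2⟩, truncdiv_eq_floordiv_of_nonneg sc (by omega)]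

-- each of A's eight appends per level builds matM of the floor quotient
theorem block_eq (size i : Int) (hsize : 0 ≤ size) (out : List (List (List Int))) :
    (PySem.List.pyRange 0 8 1).foldl (fun out _j =>
      out ++ [(PySem.List.pyRange 0 (PySem.Int.truncdiv size ((2:Int) ^ (i + 1).toNat)) 1).map (fun _y =>
               (PySem.List.pyRange 0 (PySem.Int.truncdiv size ((2:Int) ^ (i + 1).toNat)) 1).map (fun _x => (0:Int)))]) out
    = out ++ List.replicate 8 (matM (PySem.Int.floordiv size ((2:Int) ^ (i + 1).toNat))) := by
  have hpow : (0:Int) < (2:Int) ^ (i + 1).toNat := by positivity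
  have htd : PySem.Int.truncdiv size ((2:Int) ^ (i + 1).toNat)
      = PySem.Int.floordiv size ((2:Int) ^ (i + 1).toNat) := by
    simp [PySem.Int.truncdiv, PySem.Int.floordiv,
          Int.tdiv_eq_ediv_of_nonneg hsize, Int.fdiv_eq_ediv_of_nonneg size (le_of_lt hpow)]
  rw [htd, PySem.List.foldl_append_singleton_eq_map]
  congr 1
  rw [List.map_const', List.map_const', List.map_const']
  simp [PySem.List.length_pyRange_one, matM]

-- A equals the normal form
theorem create_P_eq_norm (size n0 : Int) (hsize : 0 ≤ size) :
    create_P size n0 = normP size n0 := by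
  unfold create_P normP
  rw [show ((PySem.List.pyRange 0 (countLoop size n0) 1).foldl (fun out i =>
        (PySem.List.pyRange 0 8 1).foldl (fun out _j =>
          out ++ [(PySem.List.pyRange 0 (PySem.Int.truncdiv size ((2:Int) ^ (i + 1).toNat)) 1).map (fun _y =>
                   (PySem.List.pyRange 0 (PySem.Int.truncdiv size ((2:Int) ^ (i + 1).toNat)) 1).map (fun _x => (0:Int)))]) out) [])
      = (PySem.List.pyRange 0 (countLoop size n0) 1).foldl (fun out i =>
          out ++ List.replicate 8 (matM (PySem.Int.floordiv size ((2:Int) ^ (i + 1).toNat)))) []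
    from PySem.List.foldl_congr_mem _ _ _ _ (fun out i _ => block_eq size i hsize out)]
  rw [PySem.List.foldl_append_eq_flatMap, PySem.List.pyRange_one, List.flatMap_map]
  simp only [Int.sub_zero, List.nil_append]
  apply List.flatMap_congr
  intro k _
  rw [show ((0:Int) + (k:Int) + 1).toNat = k + 1 from by omega]

-- B equals the normal form (inside Pre_)
theorem create_P_alt_eq_norm (size n0 : Int) (hn0 : 0 ≤ n0) :
    create_P_alt size n0 = normP size n0 := by
  rw [create_P_alt]
  by_cases hle : size ≤ n0
  · rw [if_pos hle]
    unfold normP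
    rw [countLoop_of_le size n0 hle]
    simp
  · have hsize : 0 < size := by omega
    have hhalf0 : 0 ≤ PySem.Int.floordiv size 2 :=
      floordiv_nonneg_of_nonneg size 2 (by omega) (by norm_num)
    rw [if_neg hle, dif_pos hn0,
        create_P_alt_eq_norm (PySem.Int.floordiv size 2) n0 hn0]
    unfold normP
    rw [countLoop_of_lt size n0 (by omega) hn0,
        show (1 + countLoop (PySem.Int.floordiv size 2) n0).toNat
           = (countLoop (PySem.Int.floordiv size 2) n0).toNat + 1 from by
          have := countLoop_nonneg (PySem.Int.floordiv size 2) n0; omega,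
        List.range_succ_eq_map, List.flatMap_cons, List.flatMap_map]
    congr 1
    · -- head block: B's comprehensions equal replicate 8 (matM (size // 2))
      rw [List.map_const', List.map_const']
      simp [PySem.List.length_pyRange_one, matM, pow_one]
    · apply List.flatMap_congr
      intro k _
      rw [floordiv_floordiv size 2 ((2:Int) ^ (k + 1)) (by norm_num) (by positivity)]
      congr 3
      simp [pow_succ]
      ring
termination_by size.toNat
decreasing_by
  rw [PySem.Int.floordiv_eq_ediv_of_pos (by norm_num : (0:Int) < 2)]
  omega

-- ===== VERDICT (by name: the statement is the Claim_ definition above) =====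
theorem create_P_spec : Claim_equal_create_P := by
  intro size n0 _ hpre
  unfold Spec_create_P
  by_cases hle : size ≤ n0
  · -- size ≤ n0: both sides are []
    unfold create_P
    rw [countLoop_of_le size n0 hle, create_P_alt, if_pos hle]
    simp [PySem.List.pyRange_one_eq_nil (by omega : (0:Int) ≤ 0)]
  · have hn0 : 0 ≤ n0 := by
      rcases hpre with h | h; exact h; omega
    rw [create_P_eq_norm size n0 (by omega), create_P_alt_eq_norm size n0 hn0]
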